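-- pv_equiv track=rewrite | github.com/jee-in/algorithm | PYTHON/BOJ/0048_히오스 프로게이머_16564/16564_히오스 프로게이머_20250106.py | get_upgrade_levels
-- ===== SOURCE A (Python) =====
-- def get_gaps(levels):
--   return [levels[i] - levels[i - 1] for i in range(1, len(levels))]
--
-- def get_upgrade_levels(levels, K):
--   gaps = get_gaps(levels)
--
--   if len(levels) == 0: return K
--
--   upgrade_level = 0
--   for i in range(len(gaps)):
--     required = gaps[i] * (i + 1)
--
--     if K >= required:
--       K -= required
--       upgrade_level += gaps[i]
--     else:
--       upgrade_level += (K // (i + 1))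
--       return upgrade_level
--
--   upgrade_level += (K // len(levels))
--   return upgrade_level
-- ===== SOURCE B (Python) =====
-- def get_upgrade_levels(levels, K):
--     # Closed-form prefix-sum scan: find the first index i where the total cost
--     # i*levels[i] - sum(levels[:i]) of lifting the first i entries to levels[i]
--     # exceeds K, then finish with one arithmetic formula (no gaps list, K never mutated).
--     n = len(levels)
--     if n == 0:
--         return K
--     S = levels[0]          # S = sum(levels[:i])
--     i = 1
--     while i < n and i * levels[i] - S <= K:
--         S += levels[i]
--         i += 1
--     top = levels[i - 1]
--     spent = (i - 1) * top - (S - top)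
--     return top - levels[0] + (K - spent) // i
-- ===== Notes on version B (the rewrite author's own statement) =====
-- stated objective: alternative
-- what changed: Replaces the materialized gaps list and the greedy sweep that mutates K and accumulates upgrade_level with a prefix-sum scan that locates the first index where the closed-form cost i*levels[i]-sum(levels[:i]) exceeds K, then computes the answer by a single arithmetic formula from the original K.
import Mathlib
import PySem

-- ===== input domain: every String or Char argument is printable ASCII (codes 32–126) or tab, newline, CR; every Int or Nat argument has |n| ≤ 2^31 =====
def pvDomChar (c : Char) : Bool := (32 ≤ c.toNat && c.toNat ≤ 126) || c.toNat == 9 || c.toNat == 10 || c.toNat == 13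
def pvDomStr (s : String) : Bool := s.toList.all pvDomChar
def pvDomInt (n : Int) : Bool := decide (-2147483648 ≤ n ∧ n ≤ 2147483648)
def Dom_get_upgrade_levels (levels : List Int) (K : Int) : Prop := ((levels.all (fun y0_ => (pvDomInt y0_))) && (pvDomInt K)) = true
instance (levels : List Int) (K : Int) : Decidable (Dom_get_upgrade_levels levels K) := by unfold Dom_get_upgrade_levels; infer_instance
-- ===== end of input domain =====

-- B replaces A's gaps-list greedy sweep (mutating K) by a prefix-sum scan for the first
-- index whose closed-form cost exceeds K plus one final formula; same O(n) cost (objective: alternative).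

-- ===== PORT A =====
-- [levels[i] - levels[i-1] for i in range(1, len(levels))]  (indices always in range, so pyGetD with default 0)
def get_gaps (levels : List Int) : List Int :=
  (PySem.List.pyRange 1 (levels.length : Int) 1).map
    (fun i => PySem.List.pyGetD levels i 0 - PySem.List.pyGetD levels (i - 1) 0)

-- the 'for i in range(len(gaps))' loop with early return, as structural recursion over gaps
def aLoop (gaps : List Int) (i K upgrade nlev : Int) : Int :=
  match gaps with
  | [] => upgrade + PySem.Int.floordiv K nlev
  | g :: rest =>
    let required := g * (i + 1)
    if required ≤ K then aLoop rest (i + 1) (K - required) (upgrade + g) nlev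
    else upgrade + PySem.Int.floordiv K (i + 1)

def get_upgrade_levels (levels : List Int) (K : Int) : Int :=
  let gaps := get_gaps levels
  if levels.length = 0 then K
  else aLoop gaps 0 K 0 (levels.length : Int)

-- ===== PORT B =====
-- the 'while i < n and i*levels[i] - S <= K' loop; returns the final (i, S)
def bLoop (levels : List Int) (n i : Nat) (S K : Int) : Nat × Int :=
  if _h : i < n ∧ (i : Int) * PySem.List.pyGetD levels (i : Int) 0 - S ≤ K then
    bLoop levels n (i + 1) (S + PySem.List.pyGetD levels (i : Int) 0) K
  else (i, S)
termination_by n - i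

def get_upgrade_levels_alt (levels : List Int) (K : Int) : Int :=
  let n := levels.length
  if n = 0 then K
  else
    let p := bLoop levels n 1 (PySem.List.pyGetD levels 0 0) K
    let i : Int := (p.1 : Int)
    let S := p.2
    let top := PySem.List.pyGetD levels (i - 1) 0
    let spent := (i - 1) * top - (S - top)
    top - PySem.List.pyGetD levels 0 0 + PySem.Int.floordiv (K - spent) i

-- ===== PRECONDITION & SPEC =====
def Spec_get_upgrade_levels (levels : List Int) (K : Int) (out : Int) : Prop := out = get_upgrade_levels_alt levels K
instance (levels : List Int) (K : Int) (out : Int) : Decidable (Spec_get_upgrade_levels levels K out) := by unfold Spec_get_upgrade_levels; infer_instance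

-- ===== CLAIM (what is proved, stated in full; the proofs are below) =====
def Claim_equal_get_upgrade_levels : Prop := ∀ (levels : List Int) (K : Int), Dom_get_upgrade_levels levels K → Spec_get_upgrade_levels levels K (get_upgrade_levels levels K)

-- ===== LEMMAS AND PROOFS =====

-- common reference sweep: returns (final level reached, final index i, money left)
def sweep (cur : Int) (rest : List Int) (i Ka : Int) : Int × Int × Int :=
  match rest with
  | [] => (cur, i, Ka)
  | x :: t =>
    if (x - cur) * i ≤ Ka then sweep x t (i + 1) (Ka - (x - cur) * i)
    else (cur, i, Ka)

-- consecutive differences, structurally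
def diffs (cur : Int) (rest : List Int) : List Int :=
  match rest with
  | [] => []
  | x :: t => (x - cur) :: diffs x t

theorem diffs_getD (t : List Int) : ∀ (l0 : Int),
    (List.range t.length).map (fun k => (l0 :: t).getD (k + 1) 0 - (l0 :: t).getD k 0) = diffs l0 t := by
  induction t with
  | nil => intro l0; rfl
  | cons x xs ih =>
    intro l0
    rw [List.length_cons, List.range_succ_eq_map, List.map_cons, List.map_map]
    simp only [List.getD_cons_succ, List.getD_cons_zero]
    show _ :: _ = _ :: diffs x xs
    congr 1
    rw [← ih x]
    rfl

theorem get_gaps_eq_diffs (l0 : Int) (rest : List Int) :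
    get_gaps (l0 :: rest) = diffs l0 rest := by
  unfold get_gaps
  rw [PySem.List.pyRange_one 1 ((l0 :: rest).length : Int), List.map_map]
  have hlen : ((((l0 :: rest).length : Int) - 1).toNat) = rest.length := by simp
  rw [hlen, ← diffs_getD rest l0]
  apply List.map_congr_left
  intro k _
  have e1 : (1 : Int) + (k : Nat) = ((k + 1 : Nat) : Int) := by push_cast; ring
  have e2 : ((k + 1 : Nat) : Int) - 1 = ((k : Nat) : Int) := by push_cast; ring
  simp only [Function.comp, e1, e2, PySem.List.pyGetD_natCast]

-- A's loop computes the sweep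
theorem aLoop_eq_sweep (rest : List Int) :
    ∀ (cur j Ka up n : Int), n = j + 1 + (rest.length : Int) →
    aLoop (diffs cur rest) j Ka up n =
      up + ((sweep cur rest (j + 1) Ka).1 - cur)
         + PySem.Int.floordiv (sweep cur rest (j + 1) Ka).2.2 (sweep cur rest (j + 1) Ka).2.1 := by
  induction rest with
  | nil =>
    intro cur j Ka up n hn
    simp only [diffs, sweep, aLoop]
    have hn' : n = j + 1 := by simpa using hn
    rw [hn']; ring
  | cons x t ih =>
    intro cur j Ka up n hn
    simp only [diffs, sweep, aLoop]
    by_cases h : (x - cur) * (j + 1) ≤ Ka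
    · rw [if_pos h, if_pos h]
      rw [ih x (j + 1) (Ka - (x - cur) * (j + 1)) (up + (x - cur)) n
            (by simp only [List.length_cons] at hn; push_cast at hn ⊢; omega)]
      ring_nf
    · rw [if_neg h, if_neg h]
      ring_nf

-- B's loop computes the sweep (invariant: cur = levels[i-1], rest = levels.drop i,
-- money left = K - (i*cur - S))
theorem bLoop_eq_sweep (rest : List Int) :
    ∀ (levels : List Int) (i : Nat) (cur S K : Int),
    1 ≤ i → i ≤ levels.length → rest = levels.drop i → cur = levels.getD (i - 1) 0 →
    ((bLoop levels levels.length i S K).1 : Int) = (sweep cur rest (i : Int) (K - ((i : Int) * cur - S))).2.1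
    ∧ levels.getD ((bLoop levels levels.length i S K).1 - 1) 0 = (sweep cur rest (i : Int) (K - ((i : Int) * cur - S))).1
    ∧ K - (((bLoop levels levels.length i S K).1 : Int) * levels.getD ((bLoop levels levels.length i S K).1 - 1) 0 - (bLoop levels levels.length i S K).2)
        = (sweep cur rest (i : Int) (K - ((i : Int) * cur - S))).2.2 := by
  induction rest with
  | nil =>
    intro levels i cur S K h1 h2 hdrop hcur
    have hin : i = levels.length := by
      have := congrArg List.length hdrop
      simp [List.length_drop] at this
      omega
    rw [bLoop, dif_neg (by omega)]
    refine ⟨rfl, ?_, ?_⟩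
    · simp only [sweep]; exact hcur.symm
    · simp only [sweep]; rw [← hcur]
  | cons x t ih =>
    intro levels i cur S K h1 h2 hdrop hcur
    have hi : i < levels.length := by
      have := congrArg List.length hdrop
      simp [List.length_drop] at this
      omega
    have hget : levels[i]? = some x := by
      have h0 : (levels.drop i)[0]? = levels[i + 0]? := List.getElem?_drop
      rw [← hdrop] at h0
      simpa using h0.symm
    have hx : levels.getD i 0 = x := by
      simp [List.getD, hget]
    have hpg : PySem.List.pyGetD levels ((i : Nat) : Int) 0 = x := by
      rw [PySem.List.pyGetD_natCast]; exact hx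
    have hcond : ((i : Int) * PySem.List.pyGetD levels (i : Int) 0 - S ≤ K)
        ↔ ((x - cur) * (i : Int) ≤ K - ((i : Int) * cur - S)) := by
      rw [hpg]; constructor <;> intro h <;> nlinarith
    rw [bLoop]
    simp only [sweep]
    by_cases h : (x - cur) * (i : Int) ≤ K - ((i : Int) * cur - S)
    · rw [dif_pos ⟨hi, hcond.mpr h⟩, if_pos h, hpg]
      have ht : t = levels.drop (i + 1) := by
        have hd : levels.drop i = x :: t := hdrop.symm
        have := congrArg List.tail hd
        simpa [List.tail_drop] using this.symm
      have hc : x = levels.getD (i + 1 - 1) 0 := by simpa using hx.symm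
      have key := ih levels (i + 1) x (S + x) K (by omega) (by omega) ht hc
      have harg : K - (((i + 1 : Nat) : Int) * x - (S + x)) = K - ((i : Int) * cur - S) - (x - cur) * (i : Int) := by
        push_cast; ring
      rw [harg] at key
      have hcast : (((i : Nat) : Int) + 1) = ((i + 1 : Nat) : Int) := by push_cast; ring
      rw [hcast]
      exact key
    · rw [dif_neg (by rintro ⟨_, hc⟩; exact h (hcond.mp hc)), if_neg h]
      exact ⟨rfl, hcur.symm, by rw [← hcur]⟩

-- ===== VERDICT (by name: the statement is the Claim_ definition above) =====
theorem bLoop_fst_ge (fuel : Nat) : ∀ (levels : List Int) (n i : Nat) (S K : Int),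
    n - i ≤ fuel → i ≤ (bLoop levels n i S K).1 := by
  induction fuel with
  | zero =>
    intro levels n i S K hf
    rw [bLoop, dif_neg (by rintro ⟨h1, _⟩; omega)]
  | succ f ih =>
    intro levels n i S K hf
    rw [bLoop]
    split
    · exact le_trans (Nat.le_succ i) (ih levels n (i + 1) _ K (by omega))
    · exact le_refl i

theorem get_upgrade_levels_spec : Claim_equal_get_upgrade_levels := by
  intro levels K _
  unfold Spec_get_upgrade_levels get_upgrade_levels get_upgrade_levels_alt
  match levels with
  | [] => simp
  | l0 :: rest =>
    have h0 : PySem.List.pyGetD (l0 :: rest) 0 0 = l0 := PySem.List.pyGetD_zero_cons l0 rest 0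
    simp only [List.length_cons, Nat.succ_ne_zero, if_false, h0, get_gaps_eq_diffs]
    rw [show ((rest.length + 1 : Nat) : Int) = 0 + 1 + (rest.length : Int) by push_cast; ring,
        aLoop_eq_sweep rest l0 0 K 0 (0 + 1 + (rest.length : Int)) rfl]
    obtain ⟨e1, e2, e3⟩ := bLoop_eq_sweep rest (l0 :: rest) 1 l0 l0 K (le_refl 1)
      (by simp) (by simp) (by simp [List.getD])
    norm_num at e1 e2 e3 ⊢
    set P := bLoop (l0 :: rest) (rest.length + 1) 1 l0 K with hPdef
    set R := sweep l0 rest 1 K with hRdef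
    have hge : 1 ≤ P.1 := by
      rw [hPdef]
      exact bLoop_fst_ge (rest.length + 1) (l0 :: rest) (rest.length + 1) 1 l0 K (by omega)
    have hidx : ((P.1 : Int) - 1) = ((P.1 - 1 : Nat) : Int) := by omega
    rw [hidx, PySem.List.pyGetD_natCast]
    simp only [List.getD] at e2 ⊢
    rw [e2, e1] at *
    have harith : K - ((R.2.1 - 1) * R.1 - (P.2 - R.1)) = R.2.2 := by rw [← e3]; ring
    rw [← hidx, harith]
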